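-- pv_equiv track=rewrite | github.com/frohlfing/tichu | src/lib/bw.py | can_score_be_ok
-- ===== SOURCE A (Python) =====
-- from typing import List, Tuple, Optional, Generator, TypedDict
--
-- def can_score_be_ok(score: Tuple[int, int], announcements: List[int]) -> bool:
--     """
--     Prüft, ob der Skore plausibel ist.
--
--     :param score: Rundenergebnis (Team20, Team31)
--     :param announcements: Tichu-Ansagen pro Spieler (0 == keine Ansage, 1 == einfaches Tichu, 2 == großes Tichu).
--     :return: True, wenn der Skore plausibel ist, sonst False.
--     """
--     # Punktzahl muss durch 5 teilbar sein.
--     if score[0] % 5 != 0 or score[1] % 5 != 0: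
--         return False
--
--     # Fälle durchspielen, wer zuerst fertig wurde
--     sum_score = score[0] + score[1]
--     for winner_index in range(4):
--         bonus = sum([(100 if winner_index == i else -100) * announcements[i] for i in range(4)])
--         if sum_score == bonus or sum_score == bonus + 200:  # normaler Sieg (die Karten ergeben in der Summe 0 Punkte) oder Doppelsieg
--             return True
--     return False
-- ===== SOURCE B (Python) =====
-- def can_score_be_ok(score, announcements):
--     if score[0] % 5 != 0 or score[1] % 5 != 0:
--         return False
--     firsts = [announcements[i] for i in range(4)]
--     need = score[0] + score[1] + 100 * sum(firsts)
--     for r in (need, need - 200):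
--         if r % 200 == 0 and r // 200 in firsts:
--             return True
--     return False
-- ===== Notes on version B (the rewrite author's own statement) =====
-- stated objective: alternative
-- what changed: Instead of looping over the four candidate winners and re-summing a signed 4-term bonus for each (16 products), B precomputes need = score[0]+score[1]+100*sum of the first four announcements once and declares the score plausible iff need or need-200 is divisible by 200 with quotient among those announcements.
-- outside the precondition, e.g. on can_score_be_ok((0, 0), []): A raises IndexError, B raises IndexError
import Mathlib
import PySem

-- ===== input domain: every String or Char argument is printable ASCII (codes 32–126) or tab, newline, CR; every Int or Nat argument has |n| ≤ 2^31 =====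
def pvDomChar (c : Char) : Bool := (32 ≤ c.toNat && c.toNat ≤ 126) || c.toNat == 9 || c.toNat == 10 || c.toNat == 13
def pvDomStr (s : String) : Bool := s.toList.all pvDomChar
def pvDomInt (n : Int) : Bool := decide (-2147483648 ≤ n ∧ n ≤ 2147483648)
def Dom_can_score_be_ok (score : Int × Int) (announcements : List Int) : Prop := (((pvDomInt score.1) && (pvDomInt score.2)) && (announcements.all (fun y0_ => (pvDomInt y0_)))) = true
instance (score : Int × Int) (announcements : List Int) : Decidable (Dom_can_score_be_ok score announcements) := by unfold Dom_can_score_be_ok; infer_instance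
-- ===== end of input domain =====

-- B replaces A's per-winner bonus summation (4×4 products) by inverting the arithmetic:
-- it computes need = sum_score + 100*(sum of the first four announcements) once and tests
-- need and need-200 for divisibility by 200 with quotient among those announcements
-- (objective: alternative decomposition; same behaviour, including raising on
-- announcement lists shorter than 4 when both %5 guards pass).

-- ===== PORT A =====
def can_score_be_ok (score : Int × Int) (announcements : List Int) : Bool :=
  if PySem.Int.mod score.1 5 != 0 || PySem.Int.mod score.2 5 != 0 then false
  else
    let sum_score := score.1 + score.2
    (PySem.List.pyRange 0 4 1).any (fun w =>
      let bonus := ((PySem.List.pyRange 0 4 1).map (fun i =>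
        (if w == i then (100 : Int) else -100) * PySem.List.pyGetD announcements i 0)).sum
      sum_score == bonus || sum_score == bonus + 200)

-- ===== PORT B =====
def can_score_be_ok_alt (score : Int × Int) (announcements : List Int) : Bool :=
  if PySem.Int.mod score.1 5 != 0 || PySem.Int.mod score.2 5 != 0 then false
  else
    let firsts := (PySem.List.pyRange 0 4 1).map (fun i => PySem.List.pyGetD announcements i 0)
    let need := score.1 + score.2 + 100 * firsts.sum
    [need, need - 200].any (fun r =>
      PySem.Int.mod r 200 == 0 && firsts.contains (PySem.Int.floordiv r 200))

-- ===== PRECONDITION & SPEC =====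
-- Pre_ excludes exactly the inputs on which the Python A raises IndexError: announcement
-- lists shorter than 4 while both scores pass the %5 guards (Python B raises there too).
def Pre_can_score_be_ok (score : Int × Int) (announcements : List Int) : Prop :=
  (PySem.Int.mod score.1 5 = 0 ∧ PySem.Int.mod score.2 5 = 0) → 4 ≤ announcements.length
instance (score : Int × Int) (announcements : List Int) : Decidable (Pre_can_score_be_ok score announcements) := by unfold Pre_can_score_be_ok; infer_instance

def pvWitness_can_score_be_ok : (Int × Int) × List Int := ((100, 0), [0, 1, 0, 0])

def Spec_can_score_be_ok (score : Int × Int) (announcements : List Int) (out : Bool) : Prop := out = can_score_be_ok_alt score announcements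
instance (score : Int × Int) (announcements : List Int) (out : Bool) : Decidable (Spec_can_score_be_ok score announcements out) := by unfold Spec_can_score_be_ok; infer_instance

-- ===== CLAIM (what is proved, stated in full; the proofs are below) =====
def Claim_equal_can_score_be_ok : Prop := ∀ (score : Int × Int) (announcements : List Int), Dom_can_score_be_ok score announcements → Pre_can_score_be_ok score announcements → Spec_can_score_be_ok score announcements (can_score_be_ok score announcements)

-- ===== LEMMAS AND PROOFS =====
theorem pyRange04 : PySem.List.pyRange 0 4 1 = [0, 1, 2, 3] := by decide

-- the core case: both %5 guards pass and the list has at least four elements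
set_option maxRecDepth 100000 in
theorem can_score_be_ok_eq_alt_of_guard (s0 s1 a0 a1 a2 a3 : Int) (rest : List Int)
    (h1 : PySem.Int.mod s0 5 = 0) (h2 : PySem.Int.mod s1 5 = 0) :
    can_score_be_ok (s0, s1) (a0 :: a1 :: a2 :: a3 :: rest) =
      can_score_be_ok_alt (s0, s1) (a0 :: a1 :: a2 :: a3 :: rest) := by
  have hc : (PySem.Int.mod s0 5 != 0 || PySem.Int.mod s1 5 != 0) = false := by
    rw [h1, h2]; rfl
  simp only [can_score_be_ok, can_score_be_ok_alt, pyRange04, hc, Bool.false_eq_true, if_false]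
  rw [Bool.eq_iff_iff]
  simp [PySem.List.pyGetD_ofNat']
  omega

-- ===== VERDICT (by name: the statement is the Claim_ definition above) =====
theorem can_score_be_ok_spec : Claim_equal_can_score_be_ok := by
  intro score announcements _ hpre
  unfold Spec_can_score_be_ok
  obtain ⟨s0, s1⟩ := score
  by_cases h0 : PySem.Int.mod s0 5 = 0 ∧ PySem.Int.mod s1 5 = 0
  · match announcements, hpre h0 with
    | a0 :: a1 :: a2 :: a3 :: rest, _ =>
      exact can_score_be_ok_eq_alt_of_guard s0 s1 a0 a1 a2 a3 rest h0.1 h0.2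
  · have hc : (PySem.Int.mod s0 5 != 0 || PySem.Int.mod s1 5 != 0) = true := by
      simp only [bne_iff_ne, Bool.or_eq_true, ne_eq]; tauto
    simp only [can_score_be_ok, can_score_be_ok_alt, hc, if_true]
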